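-- pv_equiv track=rewrite | github.com/nichechristie/luxbin-chain | launch_light_quantum.py | text_to_luxbin
-- ===== SOURCE A (Python) =====
-- LUXBIN_ALPHABET = "0123456789ABCDEFGHIJKLMNOPQRSTUVWXYZabcdefghijklmnopqrstuvwxyz+/"
--
-- def text_to_luxbin(text):
--     """Convert text to binary then LUXBIN"""
--     binary = ''.join(format(ord(c), '08b') for c in text)
--
--     # Convert binary to LUXBIN (6 bits per character)
--     luxbin = ''
--     for i in range(0, len(binary), 6):
--         chunk = binary[i:i+6].ljust(6, '0')
--         index = int(chunk, 2) % len(LUXBIN_ALPHABET)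
--         luxbin += LUXBIN_ALPHABET[index]
--
--     return luxbin, binary
-- ===== SOURCE B (Python) =====
-- LUXBIN_ALPHABET = "0123456789ABCDEFGHIJKLMNOPQRSTUVWXYZabcdefghijklmnopqrstuvwxyz+/"
--
-- def text_to_luxbin(text):
--     """Convert text to binary then LUXBIN"""
--     binary = ''.join(format(ord(c), '08b') for c in text)
--
--     # Stream the bits through a small integer buffer, 6 bits out at a time,
--     # instead of slicing the binary string into chunks.
--     out = []
--     acc = 0
--     bits = 0
--     for c in text:
--         acc = ((acc << 8) + ord(c)) & 0x3FFF  # keep at most 14 live bits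
--         bits += 8
--         while bits >= 6:
--             bits -= 6
--             out.append(LUXBIN_ALPHABET[(acc >> bits) & 63])
--     if bits > 0:
--         out.append(LUXBIN_ALPHABET[(acc << (6 - bits)) & 63])
--
--     return ''.join(out), binary
-- ===== Notes on version B (the rewrite author's own statement) =====
-- stated objective: alternative
-- what changed: The LUXBIN string is produced by streaming the character bits through a small integer bit-buffer (shift in 8 bits, mask to 14 live bits, emit a 6-bit group whenever available, left-pad the final short group), instead of materialising the binary string and re-scanning it with index ranges, slicing and int(chunk,2) parsing.
import Mathlib
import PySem

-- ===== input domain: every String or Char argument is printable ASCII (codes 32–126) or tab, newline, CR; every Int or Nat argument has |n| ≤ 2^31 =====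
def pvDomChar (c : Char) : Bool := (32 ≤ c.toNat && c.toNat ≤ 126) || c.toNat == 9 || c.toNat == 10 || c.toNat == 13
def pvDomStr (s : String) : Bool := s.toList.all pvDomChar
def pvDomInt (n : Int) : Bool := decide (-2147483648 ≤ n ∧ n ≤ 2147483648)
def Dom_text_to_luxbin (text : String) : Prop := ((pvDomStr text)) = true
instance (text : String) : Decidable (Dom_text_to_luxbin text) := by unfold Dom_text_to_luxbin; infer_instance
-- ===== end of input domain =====

-- B replaces A's build-binary-string-then-slice-and-parse pass for `luxbin` by a streaming
-- integer bit-buffer (alternative decomposition, same cost); `binary` is built the same way.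

-- ===== PORT A =====
-- LUXBIN_ALPHABET (module constant), as a char list
def pvAlph : List Char := "0123456789ABCDEFGHIJKLMNOPQRSTUVWXYZabcdefghijklmnopqrstuvwxyz+/".toList

-- format(ord(c), '08b') as a char list; exact for 0 ≤ n < 256 (all Dom characters)
def pvFmt08b (n : Nat) : List Char :=
  (List.range 8).map (fun i => if n.testBit (7 - i) then '1' else '0')

-- int(chunk, 2); exact when every char of chunk is '0' or '1' (always the case here)
def pvParseBin (cs : List Char) : Nat :=
  cs.foldl (fun a c => 2 * a + (if c = '1' then 1 else 0)) 0

def text_to_luxbin (text : String) : String × String :=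
  let binary : List Char := text.toList.flatMap (fun c => pvFmt08b c.toNat)
  let luxbin : List Char :=
    (PySem.List.pyRange 0 (binary.length : Int) 6).foldl
      (fun lux i =>
        let chunk := PySem.List.slice binary (some i) (some (i + 6))
        let chunk := chunk ++ List.replicate (6 - chunk.length) '0'  -- .ljust(6, '0')
        let index := pvParseBin chunk % pvAlph.length
        lux ++ [pvAlph.getD index ' ']) []  -- index < 64 always, so getD never defaults
  (String.ofList luxbin, String.ofList binary)

-- ===== PORT B =====
-- the `while bits >= 6` flush loop of Source B
def pvFlush (acc bits : Nat) (out : List Char) : Nat × List Char :=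
  if 6 ≤ bits then
    pvFlush acc (bits - 6) (out ++ [pvAlph.getD ((acc >>> (bits - 6)) &&& 63) ' '])
  else (bits, out)
termination_by bits
decreasing_by omega

-- one iteration of Source B's `for c in text` loop
def pvStep (st : Nat × Nat × List Char) (c : Char) : Nat × Nat × List Char :=
  let acc := ((st.1 <<< 8) + c.toNat) &&& 16383
  let bits := st.2.1 + 8
  let fo := pvFlush acc bits st.2.2
  (acc, fo.1, fo.2)

def text_to_luxbin_alt (text : String) : String × String :=
  let binary : List Char := text.toList.flatMap (fun c => pvFmt08b c.toNat)
  let st := text.toList.foldl pvStep (0, 0, ([] : List Char))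
  let out :=
    if 0 < st.2.1 then st.2.2 ++ [pvAlph.getD ((st.1 <<< (6 - st.2.1)) &&& 63) ' ']
    else st.2.2
  (String.ofList out, String.ofList binary)

-- ===== PRECONDITION & SPEC =====
def Spec_text_to_luxbin (text : String) (out : String × String) : Prop := out = text_to_luxbin_alt text
instance (text : String) (out : String × String) : Decidable (Spec_text_to_luxbin text out) := by unfold Spec_text_to_luxbin; infer_instance

-- ===== CLAIM (what is proved, stated in full; the proofs are below) =====
def Claim_equal_text_to_luxbin : Prop := ∀ (text : String), Dom_text_to_luxbin text → Spec_text_to_luxbin text (text_to_luxbin text)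

-- ===== LEMMAS AND PROOFS =====

-- abstract bit-level view shared by both proofs
def pvBitChar (b : Bool) : Char := if b then '1' else '0'
def pvVal (l : List Bool) : Nat := l.foldl (fun a b => 2 * a + b.toNat) 0
def pvBits8 (n : Nat) : List Bool := (List.range 8).map (fun i => n.testBit (7 - i))
def pvBitsOf (cs : List Char) : List Bool := cs.flatMap (fun c => pvBits8 c.toNat)
def pvPad (l : List Bool) : List Bool := l ++ List.replicate (6 - l.length) false
def pvGet (k : Nat) : Char := pvAlph.getD k ' '

def pvRem (l : List Bool) : List Bool :=
  if 6 ≤ l.length then pvRem (l.drop 6) else l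
termination_by l.length
decreasing_by simp; omega

def pvSextF (l : List Bool) : List Nat :=
  if 6 ≤ l.length then pvVal (l.take 6) :: pvSextF (l.drop 6) else []
termination_by l.length
decreasing_by simp; omega

def pvSext (l : List Bool) : List Nat :=
  if l.isEmpty then [] else pvVal (pvPad (l.take 6)) :: pvSext (l.drop 6)
termination_by l.length
decreasing_by simp; cases l <;> simp_all

lemma pvAlph_len : pvAlph.length = 64 := by decide

lemma val_foldl (l : List Bool) (x : Nat) :
    l.foldl (fun a b => 2 * a + b.toNat) x = x * 2 ^ l.length + pvVal l := by
  induction l generalizing x with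
  | nil => simp [pvVal]
  | cons h t ih =>
    have hv : pvVal (h :: t) = h.toNat * 2 ^ t.length + pvVal t := by
      simpa [pvVal] using ih h.toNat
    simp only [List.foldl_cons, List.length_cons, hv, ih (2 * x + h.toNat), pow_succ]
    ring

lemma val_lt (l : List Bool) : pvVal l < 2 ^ l.length := by
  induction l with
  | nil => simp [pvVal]
  | cons h t ih =>
    have hv : pvVal (h :: t) = h.toNat * 2 ^ t.length + pvVal t := by
      simpa [pvVal] using val_foldl t h.toNat
    have hb : h.toNat ≤ 1 := by cases h <;> simp
    simp only [hv, List.length_cons, pow_succ]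
    nlinarith [pow_pos (by norm_num : (0:Nat) < 2) t.length]

lemma val_append (a b : List Bool) :
    pvVal (a ++ b) = pvVal a * 2 ^ b.length + pvVal b := by
  simp only [pvVal, List.foldl_append]
  simpa [pvVal] using val_foldl b (List.foldl (fun a b => 2 * a + b.toNat) 0 a)

lemma val_replicate (k : Nat) : pvVal (List.replicate k false) = 0 := by
  induction k with
  | zero => simp [pvVal]
  | succ n ih => simpa [pvVal, List.replicate_succ, List.foldl_cons] using ih

lemma val_testBits (k : Nat) : ∀ n : Nat,
    pvVal ((List.range k).map (fun i => n.testBit (k - 1 - i))) = n % 2 ^ k := by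
  induction k with
  | zero => intro n; simp [pvVal, Nat.mod_one]
  | succ k ih =>
    intro n
    have hsplit : (List.range (k + 1)).map (fun i => n.testBit (k + 1 - 1 - i)) =
        ((List.range k).map (fun i => (n / 2).testBit (k - 1 - i))) ++ [n.testBit 0] := by
      rw [List.range_succ, List.map_append]
      congr 1
      · apply List.map_congr_left
        intro i hi
        have hik : i < k := List.mem_range.mp hi
        have : k + 1 - 1 - i = (k - 1 - i) + 1 := by omega
        rw [this, Nat.testBit_succ]
      · simp
    rw [hsplit, val_append]
    have h1 : pvVal [n.testBit 0] = n % 2 := by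
      rcases Nat.mod_two_eq_zero_or_one n with h | h <;>
        simp [pvVal, Nat.testBit_zero, h]
    have h2 : n % 2 ^ (k + 1) = n % 2 + 2 * (n / 2 % 2 ^ k) := by
      rw [pow_succ, mul_comm (2 ^ k) 2, Nat.mod_mul]
    simp only [ih (n / 2), List.length_cons, List.length_nil, h1, h2]
    ring

lemma val_bits8 (n : Nat) (h : n < 256) : pvVal (pvBits8 n) = n := by
  have := val_testBits 8 n
  have h8 : ∀ i : Nat, (8 : Nat) - 1 - i = 7 - i := by intro i; omega
  simp only [h8] at this
  rw [pvBits8, this, Nat.mod_eq_of_lt (by omega)]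

lemma length_bits8 (n : Nat) : (pvBits8 n).length = 8 := by
  simp [pvBits8]

lemma parse_map (l : List Bool) : pvParseBin (l.map pvBitChar) = pvVal l := by
  rw [pvParseBin, List.foldl_map]
  have : (fun (a : Nat) (b : Bool) => 2 * a + if pvBitChar b = '1' then 1 else 0) =
      (fun (a : Nat) (b : Bool) => 2 * a + b.toNat) := by
    funext a b; cases b <;> simp [pvBitChar]
  rw [this]; rfl

lemma fmt_map (n : Nat) : pvFmt08b n = (pvBits8 n).map pvBitChar := by
  rw [pvFmt08b, pvBits8, List.map_map]
  apply List.map_congr_left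
  intro i _
  simp [Function.comp, pvBitChar]

lemma binary_eq (cs : List Char) :
    cs.flatMap (fun c => pvFmt08b c.toNat) = (pvBitsOf cs).map pvBitChar := by
  rw [pvBitsOf, List.map_flatMap]
  simp only [fmt_map]


lemma rem_small (l : List Bool) (h : l.length < 6) : pvRem l = l := by
  rw [pvRem, if_neg (by omega)]

lemma sextF_small (l : List Bool) (h : l.length < 6) : pvSextF l = [] := by
  rw [pvSextF, if_neg (by omega)]

lemma rem_lt (l : List Bool) : (pvRem l).length < 6 := by
  induction l using pvRem.induct with
  | case1 l h ih => rw [pvRem, if_pos h]; exact ih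
  | case2 l h => rw [pvRem, if_neg h]; omega

lemma mod_drop (acc : Nat) (l : List Bool) (h6 : 6 ≤ l.length)
    (h : acc % 2 ^ l.length = pvVal l) :
    acc % 2 ^ (l.drop 6).length = pvVal (l.drop 6) := by
  have hsplit : l.take 6 ++ l.drop 6 = l := List.take_append_drop 6 l
  have hv : pvVal l = pvVal (l.take 6) * 2 ^ (l.drop 6).length + pvVal (l.drop 6) := by
    conv_lhs => rw [← hsplit]
    exact val_append _ _
  have hdvd : (2:Nat) ^ (l.drop 6).length ∣ 2 ^ l.length := by
    exact pow_dvd_pow 2 (by simp)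
  calc acc % 2 ^ (l.drop 6).length
      = acc % 2 ^ l.length % 2 ^ (l.drop 6).length := (Nat.mod_mod_of_dvd acc hdvd).symm
    _ = (pvVal (l.take 6) * 2 ^ (l.drop 6).length + pvVal (l.drop 6)) % 2 ^ (l.drop 6).length := by
        rw [h, hv]
    _ = pvVal (l.drop 6) := by
        rw [mul_comm, Nat.mul_add_mod, Nat.mod_eq_of_lt (val_lt _)]

lemma mod_rem (acc : Nat) (l : List Bool)
    (h : acc % 2 ^ l.length = pvVal l) :
    acc % 2 ^ (pvRem l).length = pvVal (pvRem l) := by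
  induction l using pvRem.induct with
  | case1 l h6 ih =>
    rw [pvRem, if_pos h6]
    exact ih (mod_drop acc l h6 h)
  | case2 l h6 => rw [pvRem, if_neg h6]; exact h

lemma emit_take (acc : Nat) (l : List Bool) (h6 : 6 ≤ l.length)
    (h : acc % 2 ^ l.length = pvVal l) :
    (acc >>> (l.length - 6)) &&& 63 = pvVal (l.take 6) := by
  set e := l.length - 6 with he
  have hsplit : l.take 6 ++ l.drop 6 = l := List.take_append_drop 6 l
  have hlt : (l.take 6).length = 6 := by simp; omega
  have hld : (l.drop 6).length = e := by simp [he]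
  have hv : pvVal l = pvVal (l.take 6) * 2 ^ e + pvVal (l.drop 6) := by
    conv_lhs => rw [← hsplit]
    rw [val_append, hld]
  have htlt : pvVal (l.take 6) < 64 := by
    have := val_lt (l.take 6); rw [hlt] at this; norm_num at this; exact this
  have hdlt : pvVal (l.drop 6) < 2 ^ e := by
    have := val_lt (l.drop 6); rwa [hld] at this
  have hL : (2:Nat) ^ l.length = 2 ^ e * 64 := by
    have : l.length = e + 6 := by omega
    rw [this, pow_add]; norm_num
  have hacc : acc = pvVal (l.drop 6) + 2 ^ e * (64 * (acc / 2 ^ l.length) + pvVal (l.take 6)) := by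
    conv_lhs => rw [← Nat.div_add_mod acc (2 ^ l.length)]
    rw [h, hv, hL]; ring
  have hdiv : acc >>> e = 64 * (acc / 2 ^ l.length) + pvVal (l.take 6) := by
    rw [Nat.shiftRight_eq_div_pow]
    conv_lhs => rw [hacc]
    rw [Nat.add_mul_div_left _ _ (by positivity), Nat.div_eq_of_lt hdlt, Nat.zero_add]
  rw [hdiv, show (63:Nat) = 2 ^ 6 - 1 by norm_num, Nat.and_two_pow_sub_one_eq_mod,
    show (2:Nat) ^ 6 = 64 by norm_num, Nat.mul_add_mod, Nat.mod_eq_of_lt htlt]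

lemma emit_tail (acc : Nat) (r : List Bool) (h6 : r.length < 6)
    (h : acc % 2 ^ r.length = pvVal r) :
    (acc <<< (6 - r.length)) &&& 63 = pvVal (pvPad r) := by
  set k := 6 - r.length with hk
  set v := pvVal r with hv
  have hvlt : v < 2 ^ r.length := val_lt r
  have h6 : (2:Nat) ^ r.length * 2 ^ k = 64 := by
    rw [← pow_add, show r.length + k = 6 by omega]; norm_num
  have hacc : acc = 2 ^ r.length * (acc / 2 ^ r.length) + v := by
    conv_lhs => rw [← Nat.div_add_mod acc (2 ^ r.length)]
    rw [h]
  have hmul : acc <<< k = 64 * (acc / 2 ^ r.length) + v * 2 ^ k := by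
    rw [Nat.shiftLeft_eq]
    conv_lhs => rw [hacc]
    rw [← h6]; ring
  have hlt : v * 2 ^ k < 64 := by
    calc v * 2 ^ k < 2 ^ r.length * 2 ^ k := by
          exact (Nat.mul_lt_mul_right (Nat.two_pow_pos k)).mpr hvlt
      _ = 64 := h6
  have hpad : pvVal (pvPad r) = v * 2 ^ k := by
    rw [pvPad, val_append, val_replicate, List.length_replicate, Nat.add_zero, hk]
  rw [hmul, hpad, show (63:Nat) = 2 ^ 6 - 1 by norm_num, Nat.and_two_pow_sub_one_eq_mod,
    show (2:Nat) ^ 6 = 64 by norm_num, Nat.mul_add_mod, Nat.mod_eq_of_lt hlt]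

lemma flush_spec : ∀ (bits acc : Nat) (out : List Char) (r : List Bool),
    r.length = bits → acc % 2 ^ bits = pvVal r →
    pvFlush acc bits out = ((pvRem r).length, out ++ (pvSextF r).map pvGet) := by
  intro bits
  induction bits using Nat.strong_induction_on with
  | _ bits IH =>
    intro acc out r hr hm
    rw [pvFlush]
    by_cases h6 : 6 ≤ bits
    · rw [if_pos h6]
      have hr6 : 6 ≤ r.length := by omega
      have hmr : acc % 2 ^ r.length = pvVal r := by rw [hr]; exact hm
      have hchar : acc >>> (bits - 6) &&& 63 = pvVal (r.take 6) := by
        rw [← hr]; exact emit_take acc r hr6 hmr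
      have hlen : (r.drop 6).length = bits - 6 := by simp; omega
      have hrec := IH (bits - 6) (by omega) acc
        (out ++ [pvAlph.getD (acc >>> (bits - 6) &&& 63) ' ']) (r.drop 6) hlen
        (by rw [← hlen]; exact mod_drop acc r hr6 hmr)
      have hrr : pvRem r = pvRem (r.drop 6) := by rw [pvRem, if_pos hr6]
      have hsf : pvSextF r = pvVal (r.take 6) :: pvSextF (r.drop 6) := by
        rw [pvSextF, if_pos hr6]
      rw [hrec, hrr, hsf]
      simp [hchar, pvGet]
    · rw [if_neg h6]
      have : r.length < 6 := by omega
      rw [rem_small r this, sextF_small r this, hr]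
      simp

lemma rem_append (r x : List Bool) :
    pvRem (r ++ x) = pvRem (pvRem r ++ x) ∧
    pvSextF (r ++ x) = pvSextF r ++ pvSextF (pvRem r ++ x) := by
  induction r using pvRem.induct with
  | case1 r h6 ih =>
    have h6' : 6 ≤ (r ++ x).length := by simp; omega
    have htk : (r ++ x).drop 6 = r.drop 6 ++ x := List.drop_append_of_le_length h6
    have htake : (r ++ x).take 6 = r.take 6 := List.take_append_of_le_length h6
    have hrr : pvRem r = pvRem (r.drop 6) := by rw [pvRem, if_pos h6]
    have hsf : pvSextF r = pvVal (r.take 6) :: pvSextF (r.drop 6) := by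
      rw [pvSextF, if_pos h6]
    constructor
    · rw [pvRem, if_pos h6', htk, ih.1, hrr]
    · rw [pvSextF, if_pos h6', htk, htake, ih.2, hsf, hrr]
      simp
  | case2 r h6 =>
    have : r.length < 6 := by omega
    rw [rem_small r this, sextF_small r this]
    simp

lemma loopB : ∀ (l : List Char), (∀ c ∈ l, c.toNat < 256) →
    ∀ (acc bits : Nat) (out : List Char) (p : List Bool),
    p.length = bits → bits < 6 → acc % 2 ^ bits = pvVal p →
    ∃ A, l.foldl pvStep (acc, bits, out) =
        (A, (pvRem (p ++ pvBitsOf l)).length,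
          out ++ (pvSextF (p ++ pvBitsOf l)).map pvGet) ∧
      A % 2 ^ (pvRem (p ++ pvBitsOf l)).length = pvVal (pvRem (p ++ pvBitsOf l)) := by
  intro l
  induction l with
  | nil =>
    intro _ acc bits out p hp hb hm
    refine ⟨acc, ?_, ?_⟩
    · simp [pvBitsOf, rem_small p (by omega), sextF_small p (by omega), hp]
    · simp [pvBitsOf, rem_small p (by omega), hp.symm ▸ hm]
  | cons c l ih =>
    intro hlt acc bits out p hp hb hm
    have hc : c.toNat < 256 := hlt c (by simp)
    have hl : ∀ c' ∈ l, c'.toNat < 256 := fun c' h => hlt c' (by simp [h])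
    set r' : List Bool := p ++ pvBits8 c.toNat with hr'
    have hr'len : r'.length = bits + 8 := by simp [hr', length_bits8, hp]
    set acc' : Nat := ((acc <<< 8) + c.toNat) &&& 16383 with hacc'
    have hm' : acc' % 2 ^ (bits + 8) = pvVal r' := by
      have h1 : acc' = (acc * 256 + c.toNat) % 16384 := by
        rw [hacc', Nat.shiftLeft_eq, show (16383:Nat) = 2 ^ 14 - 1 by norm_num,
          Nat.and_two_pow_sub_one_eq_mod]
      have hdvd : (2:Nat) ^ (bits + 8) ∣ 16384 := by
        rw [show (16384:Nat) = 2 ^ 14 by norm_num]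
        exact pow_dvd_pow 2 (by omega)
      have h2 : acc' % 2 ^ (bits + 8) = (acc * 256 + c.toNat) % 2 ^ (bits + 8) := by
        rw [h1, Nat.mod_mod_of_dvd _ hdvd]
      have h3 : (2:Nat) ^ (bits + 8) = 256 * 2 ^ bits := by
        rw [pow_add]; ring
      have h4 : (acc * 256 + c.toNat) % (256 * 2 ^ bits)
          = c.toNat + 256 * (acc % 2 ^ bits) := by
        rw [Nat.mod_mul]
        congr 1
        · rw [mul_comm acc 256, Nat.mul_add_mod, Nat.mod_eq_of_lt hc]
        · congr 1
          rw [mul_comm acc 256, Nat.mul_add_div (by norm_num), Nat.div_eq_of_lt hc,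
            Nat.add_zero]
      have h5 : pvVal r' = pvVal p * 256 + c.toNat := by
        rw [hr', val_append, length_bits8, val_bits8 c.toNat hc]
        norm_num
      rw [h2, h3, h4, h5, hm]
      ring
    have hflush := flush_spec (bits + 8) acc' out r' hr'len hm'
    have hstep : pvStep (acc, bits, out) c =
        (acc', (pvRem r').length, out ++ (pvSextF r').map pvGet) := by
      simp only [pvStep, ← hacc', hflush]
    have hmrem : acc' % 2 ^ (pvRem r').length = pvVal (pvRem r') :=
      mod_rem acc' r' (by rw [hr'len]; exact hm')
    obtain ⟨A, hA1, hA2⟩ := ih hl acc' (pvRem r').length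
      (out ++ (pvSextF r').map pvGet) (pvRem r') rfl (rem_lt r') hmrem
    refine ⟨A, ?_, ?_⟩
    · have hbs : p ++ pvBitsOf (c :: l) = r' ++ pvBitsOf l := by
        simp [pvBitsOf, hr']
      rw [List.foldl_cons, hstep, hA1, hbs, (rem_append r' (pvBitsOf l)).1,
        (rem_append r' (pvBitsOf l)).2]
      simp
    · have hbs : p ++ pvBitsOf (c :: l) = r' ++ pvBitsOf l := by
        simp [pvBitsOf, hr']
      rw [hbs, (rem_append r' (pvBitsOf l)).1]
      exact hA2

lemma sext_decomp (l : List Bool) :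
    pvSext l = pvSextF l ++ (if (pvRem l).isEmpty then [] else [pvVal (pvPad (pvRem l))]) := by
  induction l using pvSext.induct with
  | case1 l h =>
    have : l = [] := by simpa using h
    subst this
    simp [pvSext, pvSextF, pvRem]
  | case2 l h ih =>
    have hne : l ≠ [] := by simpa using h
    by_cases h6 : 6 ≤ l.length
    · have htake : (l.take 6).length = 6 := by simp; omega
      have hpad : pvPad (l.take 6) = l.take 6 := by
        simp [pvPad, htake]
      have hsf : pvSextF l = pvVal (l.take 6) :: pvSextF (l.drop 6) := by
        rw [pvSextF, if_pos h6]
      have hrr : pvRem l = pvRem (l.drop 6) := by rw [pvRem, if_pos h6]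
      rw [pvSext, if_neg (by simpa using hne), hpad, hsf, hrr, ih]
      simp
    · have hlen : l.length < 6 := by omega
      rw [pvSext, if_neg (by simpa using hne)]
      rw [List.take_of_length_le (by omega), List.drop_eq_nil_of_le (by omega)]
      rw [pvSext, if_pos (by simp)]
      rw [sextF_small l hlen, rem_small l hlen]
      simp [hne]

def pvEnc (bs : List Bool) (k : Nat) : Char := pvGet (pvVal (pvPad ((bs.drop (6 * k)).take 6)))

lemma chunksA : ∀ (bs : List Bool),
    (List.range ((bs.length + 5) / 6)).map (pvEnc bs) = (pvSext bs).map pvGet := by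
  intro bs
  induction bs using pvSext.induct with
  | case1 l h =>
    have : l = [] := by simpa using h
    subst this
    simp [pvSext]
  | case2 l h ih =>
    have hne : l ≠ [] := by simpa using h
    have hpos : 0 < l.length := List.length_pos_iff.mpr hne
    have hm : (l.length + 5) / 6 = ((l.drop 6).length + 5) / 6 + 1 := by
      simp; omega
    rw [hm, List.range_succ_eq_map, List.map_cons, List.map_map]
    rw [pvSext, if_neg (by simpa using hne), List.map_cons]
    congr 1
    have hcomp : ∀ k, (pvEnc l ∘ Nat.succ) k = pvEnc (l.drop 6) k := by
      intro k
      have hd : l.drop (6 * (k + 1)) = (l.drop 6).drop (6 * k) := by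
        rw [List.drop_drop]
        congr 1
        omega
      simp only [Function.comp, pvEnc, Nat.succ_eq_add_one, hd]
    rw [List.map_congr_left (fun a _ => hcomp a)]
    simpa using ih

lemma pyRange6 (L : Nat) :
    PySem.List.pyRange 0 (L : Int) 6 = (List.range ((L + 5) / 6)).map (fun k => ((6 * k : Nat) : Int)) := by
  rw [PySem.List.pyRange_of_pos _ _ (by norm_num)]
  by_cases hL : L = 0
  · subst hL; simp
  · have h0 : (0:Int) < (L:Int) := by exact_mod_cast Nat.pos_of_ne_zero hL
    rw [if_pos h0]
    have hcnt : (((L:Int) - 0 + 6 - 1) / 6).toNat = (L + 5) / 6 := by omega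
    rw [hcnt]
    apply List.map_congr_left
    intro k _
    push_cast
    ring

lemma portA_lux (bs : List Bool) :
    (PySem.List.pyRange 0 (((bs.map pvBitChar).length : Nat) : Int) 6).foldl
      (fun lux i =>
        lux ++ [pvAlph.getD (pvParseBin
          (PySem.List.slice (bs.map pvBitChar) (some i) (some (i + 6)) ++
            List.replicate
              (6 - (PySem.List.slice (bs.map pvBitChar) (some i) (some (i + 6))).length) '0')
          % pvAlph.length) ' ']) []
    = (pvSext bs).map pvGet := by
  rw [PySem.List.foldl_append_singleton_eq_map, List.nil_append, List.length_map, pyRange6,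
    List.map_map, ← chunksA bs]
  apply List.map_congr_left
  intro k _
  simp only [Function.comp]
  have hslice : PySem.List.slice (bs.map pvBitChar) (some ((6 * k : Nat) : Int))
      (some (((6 * k : Nat) : Int) + 6)) = ((bs.drop (6 * k)).take 6).map pvBitChar := by
    rw [PySem.List.slice_toNat _ (by omega) (by omega)]
    have h1 : ((6 * k : Nat) : Int).toNat = 6 * k := Int.toNat_natCast _
    have h2 : (((6 * k : Nat) : Int) + 6).toNat = 6 * k + 6 := by omega
    rw [h1, h2, Nat.add_sub_cancel_left, List.map_take, List.map_drop]
  rw [hslice]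
  set t : List Bool := (bs.drop (6 * k)).take 6 with ht
  have htlen : t.length ≤ 6 := by simp [ht]
  have hchunk : (t.map pvBitChar) ++
      List.replicate (6 - (t.map pvBitChar).length) '0' = (pvPad t).map pvBitChar := by
    rw [List.length_map, pvPad, List.map_append, List.map_replicate]
    simp [pvBitChar]
  have hpadlen : (pvPad t).length = 6 := by
    simp [pvPad]; omega
  have hlt : pvVal (pvPad t) < 64 := by
    have := val_lt (pvPad t)
    rw [hpadlen] at this
    norm_num at this
    exact this
  rw [hchunk, parse_map, pvAlph_len, Nat.mod_eq_of_lt hlt]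
  rfl

-- ===== VERDICT (by name: the statement is the Claim_ definition above) =====
theorem text_to_luxbin_spec : Claim_equal_text_to_luxbin := by
  intro text hdom
  have hchars : ∀ c ∈ text.toList, c.toNat < 256 := by
    unfold Dom_text_to_luxbin pvDomStr at hdom
    rw [List.all_eq_true] at hdom
    intro c hc
    have := hdom c hc
    unfold pvDomChar at this
    simp at this
    omega
  unfold Spec_text_to_luxbin
  obtain ⟨A, hA1, hA2⟩ := loopB text.toList hchars 0 0 [] []
    rfl (by norm_num) (by simp [pvVal])
  rw [List.nil_append] at hA1
  simp only [text_to_luxbin, text_to_luxbin_alt]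
  rw [binary_eq text.toList, hA1]
  simp only []
  rw [portA_lux (pvBitsOf text.toList)]
  by_cases hrem : (pvRem (pvBitsOf text.toList)).length = 0
  · have hnil : pvRem (pvBitsOf text.toList) = [] := List.eq_nil_of_length_eq_zero hrem
    rw [if_neg (by omega)]
    have : pvSext (pvBitsOf text.toList) = pvSextF (pvBitsOf text.toList) := by
      rw [sext_decomp, hnil]
      simp
    rw [this]
    simp
  · rw [if_pos (by omega)]
    have hne : pvRem (pvBitsOf text.toList) ≠ [] := by
      intro h
      rw [h] at hrem
      simp at hrem
    have hemit := emit_tail A (pvRem (pvBitsOf text.toList)) (rem_lt _) hA2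
    rw [hemit]
    have : pvSext (pvBitsOf text.toList) = pvSextF (pvBitsOf text.toList)
        ++ [pvVal (pvPad (pvRem (pvBitsOf text.toList)))] := by
      rw [sext_decomp]
      simp [hne]
    rw [this]
    simp [pvGet]
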